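-- pv_equiv track=rewrite | github.com/LaKHamote/Lixo | APC/Fechem as portas.py | fecha_portas_sequenciais
-- ===== SOURCE A (Python) =====
-- def fecha_portas(N, numerador, denominador, estado_portas):
--     if N == 0:
--         return
--     if denominador == 1:
--         estado_portas += 10**(N - numerador)
--         return estado_portas
--     else:
--         if numerador % denominador != 0:
--             return fecha_portas(N, numerador, denominador - 1, estado_portas)
--         else:
--             estado_portas += 10**(N - numerador)
--             return fecha_portas(N, numerador, denominador - 1, estado_portas)
--
-- def fecha_portas_sequenciais(N, numerador , denominador, estado_portas_iniciais):
--     if N == 0: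
--         return
--     if numerador == 1:
--         return estado_portas_iniciais
--     else:
--         estado_portas_alteradas = fecha_portas(N, numerador - 1, denominador - 1, estado_portas_iniciais)
--         return fecha_portas_sequenciais(N, numerador - 1, denominador - 1, estado_portas_alteradas)
-- ===== SOURCE B (Python) =====
-- def fecha_portas_sequenciais(N, numerador, denominador, estado_portas_iniciais):
--     # Return-value re-implementation: a single iterative loop; each door m < numerador
--     # contributes (number of divisors of m) * 10**(N - m); no dependence of the scan
--     # bound on `denominador`.
--     if N == 0:
--         return None
--     total = estado_portas_iniciais
--     for m in range(1, numerador):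
--         cnt = 0
--         for d in range(1, m + 1):
--             if m % d == 0:
--                 cnt += 1
--         total += cnt * 10 ** (N - m)
--     return total
-- ===== Notes on version B (the rewrite author's own statement) =====
-- stated objective: alternative
-- what changed: Replaces A's two mutually recursive functions (whose per-door divisor scan counts down from denominador-k and threads the accumulator through the recursion) by a single iterative loop that, for each door m = 1..numerador-1, counts m's divisors by scanning only 1..m, so the work no longer depends on denominador.
-- outside the precondition, e.g. on fecha_portas_sequenciais(6, 10, 24, 0): A returns 122324.243, B returns 122324.24299999999; on fecha_portas_sequenciais(1, 3, 3, 0): A returns 1.2, B returns 1.2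
import Mathlib
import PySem

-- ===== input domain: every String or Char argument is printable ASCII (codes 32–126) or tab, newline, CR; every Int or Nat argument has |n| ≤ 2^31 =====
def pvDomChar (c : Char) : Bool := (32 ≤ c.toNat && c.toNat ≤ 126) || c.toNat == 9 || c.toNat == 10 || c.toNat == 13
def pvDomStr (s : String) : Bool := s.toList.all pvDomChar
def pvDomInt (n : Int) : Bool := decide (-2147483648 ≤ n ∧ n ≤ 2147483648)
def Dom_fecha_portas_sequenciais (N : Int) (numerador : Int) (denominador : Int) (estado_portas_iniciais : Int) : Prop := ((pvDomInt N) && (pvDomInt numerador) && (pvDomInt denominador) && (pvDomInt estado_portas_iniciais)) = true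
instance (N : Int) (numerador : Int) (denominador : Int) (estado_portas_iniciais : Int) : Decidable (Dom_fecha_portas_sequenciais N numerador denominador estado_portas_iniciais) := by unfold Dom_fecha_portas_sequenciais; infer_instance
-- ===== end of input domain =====

-- B replaces A's mutual recursion (whose divisor scan runs over 2..denominador-k) by one
-- iterative loop that counts each door's divisors directly over 1..m, independent of
-- `denominador`; objective: alternative.


-- ===== PORT A =====
-- Python's `10 ** e` yields a FLOAT (not an int) for e < 0: modelled as `none` (no Int value).
def pvPow10 (e : Int) : Option Int := if e < 0 then none else some (10 ^ e.toNat)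

-- Literal port of the helper `fecha_portas`.  For den = 0 Python raises ZeroDivisionError
-- (numerador % 0) and for den < 0 it recurses forever: both return `none` here (totality guard).
def fechaPortas (N num den estado : Int) : Option Int :=
  if N = 0 then none
  else if den = 1 then (pvPow10 (N - num)).map (fun p => estado + p)
  else if den ≤ 0 then none
  else if PySem.Int.mod num den ≠ 0 then fechaPortas N num (den - 1) estado
  else
    match pvPow10 (N - num) with
    | none => none
    | some p => fechaPortas N num (den - 1) (estado + p)
termination_by den.toNat
decreasing_by all_goals omega

-- Literal port of A.  For numerador ≤ 0 (and N ≠ 0) Python recurses forever: `none` (totality guard).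
def fecha_portas_sequenciais (N : Int) (numerador : Int) (denominador : Int) (estado_portas_iniciais : Int) : Option Int :=
  if N = 0 then none
  else if numerador = 1 then some estado_portas_iniciais
  else if numerador ≤ 0 then none
  else
    match fechaPortas N (numerador - 1) (denominador - 1) estado_portas_iniciais with
    | none => none
    | some estado_portas_alteradas =>
        fecha_portas_sequenciais N (numerador - 1) (denominador - 1) estado_portas_alteradas
termination_by numerador.toNat
decreasing_by omega

-- ===== PORT B =====
-- B's inner loop: `cnt` after `for d in range(1, m+1): if m % d == 0: cnt += 1`.
def pvCountDivs (m : Int) : Int :=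
  (PySem.List.pyRange 1 (m + 1) 1).foldl
    (fun cnt d => if PySem.Int.mod m d = 0 then cnt + 1 else cnt) 0

-- Literal port of B (Source B): one loop over m = 1..numerador-1 accumulating
-- total += cnt * 10**(N-m); a float total (negative exponent) is `none` and propagates.
def fecha_portas_sequenciais_alt (N : Int) (numerador : Int) (denominador : Int) (estado_portas_iniciais : Int) : Option Int :=
  if N = 0 then none
  else
    (PySem.List.pyRange 1 numerador 1).foldl
      (fun total m => total.bind (fun t => (pvPow10 (N - m)).map (fun p => t + pvCountDivs m * p)))
      (some estado_portas_iniciais)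

-- ===== PRECONDITION & SPEC =====
-- Pre_ excludes exactly the inputs where Python A does not return an int: numerador ≤ 0 or
-- denominador < numerador (ZeroDivisionError / unbounded recursion), and numerador > N + 1
-- (a negative exponent makes 10**e a float, so the returned value is not an int).
def Pre_fecha_portas_sequenciais (N : Int) (numerador : Int) (denominador : Int) (estado_portas_iniciais : Int) : Prop :=
  N = 0 ∨ numerador = 1 ∨ (2 ≤ numerador ∧ numerador ≤ N + 1 ∧ numerador ≤ denominador)
instance (N : Int) (numerador : Int) (denominador : Int) (estado_portas_iniciais : Int) : Decidable (Pre_fecha_portas_sequenciais N numerador denominador estado_portas_iniciais) := by unfold Pre_fecha_portas_sequenciais; infer_instance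

def pvWitness_fecha_portas_sequenciais : Int × Int × Int × Int := (3, 3, 3, 0)

def Spec_fecha_portas_sequenciais (N : Int) (numerador : Int) (denominador : Int) (estado_portas_iniciais : Int) (out : Option Int) : Prop := out = fecha_portas_sequenciais_alt N numerador denominador estado_portas_iniciais
instance (N : Int) (numerador : Int) (denominador : Int) (estado_portas_iniciais : Int) (out : Option Int) : Decidable (Spec_fecha_portas_sequenciais N numerador denominador estado_portas_iniciais out) := by unfold Spec_fecha_portas_sequenciais; infer_instance

-- ===== CLAIM (what is proved, stated in full; the proofs are below) =====
def Claim_equal_fecha_portas_sequenciais : Prop := ∀ (N : Int) (numerador : Int) (denominador : Int) (estado_portas_iniciais : Int), Dom_fecha_portas_sequenciais N numerador denominador estado_portas_iniciais → Pre_fecha_portas_sequenciais N numerador denominador estado_portas_iniciais → Spec_fecha_portas_sequenciais N numerador denominador estado_portas_iniciais (fecha_portas_sequenciais N numerador denominador estado_portas_iniciais)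

-- ===== LEMMAS AND PROOFS =====

-- count of divisors of m among 2..den (the ones A's helper scans)
def dcnt (m den : Int) : Nat :=
  (PySem.List.pyRange 2 (den + 1) 1).countP (fun d => decide (PySem.Int.mod m d = 0))

theorem pvPow10_of_nonneg {e : Int} (h : 0 ≤ e) : pvPow10 e = some (10 ^ e.toNat) := by
  simp [pvPow10, not_lt.mpr h]

theorem bfold_some (N : Int) :
    ∀ (L : List Int) (estado : Int), (∀ m ∈ L, 0 ≤ N - m) →
    L.foldl (fun total m => total.bind (fun t => (pvPow10 (N - m)).map (fun p => t + pvCountDivs m * p)))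
        (some estado)
      = some (estado + (L.map (fun m => pvCountDivs m * 10 ^ (N - m).toNat)).sum) := by
  intro L
  induction L with
  | nil => intro estado _; simp
  | cons a L ih =>
      intro estado h
      have ha : 0 ≤ N - a := h a (by simp)
      simp only [List.foldl_cons, pvPow10_of_nonneg ha, Option.bind_some, Option.map_some]
      rw [ih _ (fun m hm => h m (by simp [hm]))]
      simp [add_assoc]

theorem pvCountDivs_eq (m : Int) (h1 : 1 ≤ m) : pvCountDivs m = 1 + (dcnt m m : Int) := by
  unfold pvCountDivs dcnt
  rw [PySem.List.pyRange_one_cons (by omega : (1:Int) < m + 1)]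
  rw [List.foldl_cons]
  have hm1 : PySem.Int.mod m 1 = 0 := by
    rw [PySem.Int.mod_eq_zero_iff_dvd]; exact one_dvd m
  rw [if_pos hm1, PySem.List.foldl_ite_add_one]
  norm_num
-- patch: finish with norm_num

theorem dcnt_clip (m den : Int) (h1 : 1 ≤ m) (h2 : m ≤ den) : dcnt m den = dcnt m m := by
  unfold dcnt
  rw [PySem.List.pyRange_one_append 2 (m + 1) (den + 1) (by omega) (by omega)]
  rw [List.countP_append]
  have : (PySem.List.pyRange (m + 1) (den + 1) 1).countP (fun d => decide (PySem.Int.mod m d = 0)) = 0 := by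
    rw [List.countP_eq_zero]
    intro d hd
    have hmem := PySem.List.mem_pyRange_one.mp hd
    have : PySem.Int.mod m d = m := by
      rw [PySem.Int.mod_eq_emod_of_pos (by omega)]
      exact Int.emod_eq_of_lt (by omega) (by omega)
    simp [this]; omega
  omega

theorem fechaPortas_char (N num : Int) (hN : N ≠ 0) (hp : 0 ≤ N - num) :
    ∀ (k : Nat) (den estado : Int), den = (k : Int) + 1 →
    fechaPortas N num den estado
      = some (estado + (1 + (dcnt num den : Int)) * 10 ^ (N - num).toNat) := by
  intro k
  induction k with
  | zero =>
      intro den estado hden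
      subst hden
      rw [fechaPortas]
      simp [hN, pvPow10_of_nonneg hp, dcnt]
  | succ k ih =>
      intro den estado hden
      have hden2 : 2 ≤ den := by omega
      rw [fechaPortas]
      have hsplit : dcnt num den = dcnt num (den - 1) +
          (if PySem.Int.mod num den = 0 then 1 else 0) := by
        unfold dcnt
        have : den + 1 = (den - 1 + 1) + 1 := by ring
        rw [this, PySem.List.pyRange_one_succ_right (by omega), List.countP_append]
        have : den - 1 + 1 = den := by ring
        rw [this]
        by_cases h : PySem.Int.mod num den = 0 <;> simp [h]
      rw [if_neg hN, if_neg (by omega : ¬ den = 1), if_neg (by omega : ¬ den ≤ 0)]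
      by_cases hmod : PySem.Int.mod num den = 0
      · rw [if_neg (by simp [hmod]), pvPow10_of_nonneg hp]
        show fechaPortas N num (den - 1) (estado + 10 ^ (N - num).toNat) = _
        rw [ih (den - 1) (estado + 10 ^ (N - num).toNat) (by omega)]
        rw [hsplit, if_pos hmod]
        congr 1
        push_cast
        ring
      · rw [if_pos (by simp [hmod])]
        rw [ih (den - 1) estado (by omega)]
        rw [hsplit, if_neg hmod]
        norm_num

theorem main_eq (N : Int) (hN : N ≠ 0) :
    ∀ (k : Nat) (num den estado : Int), num = (k : Int) + 1 → num ≤ N + 1 → num ≤ den →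
    fecha_portas_sequenciais N num den estado = fecha_portas_sequenciais_alt N num den estado := by
  intro k
  induction k with
  | zero =>
      intro num den estado h1 _ _
      rw [fecha_portas_sequenciais, fecha_portas_sequenciais_alt]
      rw [if_neg hN, if_neg hN, if_pos (by omega : num = 1)]
      rw [show num = (1:Int) by omega, PySem.List.pyRange_one_eq_nil (by omega : (1:Int) ≤ 1)]
      simp
  | succ k ih =>
      intro num den estado h1 hle hde
      have h2 : 2 ≤ num := by omega
      have hp : 0 ≤ N - (num - 1) := by omega
      -- A's first step
      have hchar : fechaPortas N (num - 1) (den - 1) estado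
          = some (estado + pvCountDivs (num - 1) * 10 ^ (N - (num - 1)).toNat) := by
        rw [fechaPortas_char N (num - 1) hN hp (den - 2).toNat (den - 1) estado (by omega)]
        rw [dcnt_clip (num - 1) (den - 1) (by omega) (by omega)]
        rw [← pvCountDivs_eq (num - 1) (by omega)]
      rw [fecha_portas_sequenciais]
      rw [if_neg hN, if_neg (by omega : ¬ num = 1), if_neg (by omega : ¬ num ≤ 0), hchar]
      show fecha_portas_sequenciais N (num - 1) (den - 1) _ = _
      rw [ih (num - 1) (den - 1) _ (by omega) (by omega) (by omega)]
      -- now both sides are B at num-1 / num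
      rw [fecha_portas_sequenciais_alt, fecha_portas_sequenciais_alt]
      rw [if_neg hN, if_neg hN]
      have hmem : ∀ m ∈ PySem.List.pyRange 1 (num - 1) 1, 0 ≤ N - m := by
        intro m hm
        have := PySem.List.mem_pyRange_one.mp hm
        omega
      rw [bfold_some N _ _ hmem]
      have : num = (num - 1) + 1 := by ring
      rw [this, PySem.List.pyRange_one_succ_right (by omega : (1:Int) ≤ num - 1)]
      rw [bfold_some N _ _ (by
        intro m hm
        rcases List.mem_append.mp hm with hm | hm
        · exact hmem m hm
        · simp at hm; omega)]
      simp only [List.map_append, List.sum_append, List.map_cons, List.map_nil, List.sum_cons, List.sum_nil]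
      ring_nf

-- ===== VERDICT (by name: the statement is the Claim_ definition above) =====
theorem fecha_portas_sequenciais_spec : Claim_equal_fecha_portas_sequenciais := by
  intro N num den estado _ hpre
  unfold Spec_fecha_portas_sequenciais
  rcases hpre with h0 | h1 | ⟨h2, hle, hde⟩
  · subst h0
    simp [fecha_portas_sequenciais, fecha_portas_sequenciais_alt]
  · subst h1
    by_cases hN : N = 0
    · subst hN; simp [fecha_portas_sequenciais, fecha_portas_sequenciais_alt]
    · simp [fecha_portas_sequenciais, fecha_portas_sequenciais_alt, hN,
        PySem.List.pyRange_one_eq_nil (by omega : (1:Int) ≤ 1)]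
  · have hN : N ≠ 0 := by omega
    exact main_eq N hN (num - 1).toNat num den estado (by omega) hle hde
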